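-- pv_equiv track=rewrite | github.com/bashbaug/adventofcode_2021 | day22/go.py | splitcube
-- ===== SOURCE A (Python) =====
-- import copy
--
-- def splitcube(s, r):
--     splits = [s]
--     for coord in (0, 1, 2):
--         newsplits = []
--         for s in splits:
--             if s['min'][coord] < r['min'][coord]:
--                 if s['max'][coord] <= r['max'][coord]:
--                     nl = copy.deepcopy(s)
--                     nl['max'][coord] = r['min'][coord] - 1
--                     nr = copy.deepcopy(s)
--                     nr['min'][coord] = r['min'][coord]
--                     newsplits.extend([nl, nr])
--                 else:
--                     nl = copy.deepcopy(s)
--                     nl['max'][coord] = r['min'][coord] - 1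
--                     nc = copy.deepcopy(s)
--                     nc['min'][coord] = r['min'][coord]
--                     nc['max'][coord] = r['max'][coord]
--                     nr = copy.deepcopy(s)
--                     nr['min'][coord] = r['max'][coord] + 1
--                     newsplits.extend([nl, nc, nr])
--             else:
--                 if s['max'][coord] <= r['max'][coord]:
--                     newsplits.append(s)
--                 else:
--                     nl = copy.deepcopy(s)
--                     nl['max'][coord] = r['max'][coord]
--                     nr = copy.deepcopy(s)
--                     nr['min'][coord] = r['max'][coord] + 1
--                     newsplits.extend([nl, nr])
--         splits = newsplits
--     return splits
-- ===== SOURCE B (Python) =====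
-- import copy
--
-- def splitcube(s, r):
--     # Per-axis partition + cartesian product; value-equal to A's nested
--     # split (A returns the input object itself when nothing splits; B
--     # always returns fresh copies -- same values, different identity).
--     def parts(lo, hi, rlo, rhi):
--         if lo < rlo:
--             if hi <= rhi:
--                 return [(lo, rlo - 1), (rlo, hi)]
--             return [(lo, rlo - 1), (rlo, rhi), (rhi + 1, hi)]
--         if hi <= rhi:
--             return [(lo, hi)]
--         return [(lo, rhi), (rhi + 1, hi)]
--     axes = [parts(s['min'][c], s['max'][c], r['min'][c], r['max'][c])
--             for c in (0, 1, 2)]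
--     out = []
--     for p0 in axes[0]:
--         for p1 in axes[1]:
--             for p2 in axes[2]:
--                 c = copy.deepcopy(s)
--                 for coord, (lo, hi) in enumerate((p0, p1, p2)):
--                     c['min'][coord] = lo
--                     c['max'][coord] = hi
--                 out.append(c)
--     return out
-- ===== Notes on version B (the rewrite author's own statement) =====
-- stated objective: alternative
-- what changed: B replaces A's three sequential re-splitting passes over a growing list of pieces by computing the per-axis interval partition once per axis and taking the cartesian product of the three partitions.
import Mathlib
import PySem

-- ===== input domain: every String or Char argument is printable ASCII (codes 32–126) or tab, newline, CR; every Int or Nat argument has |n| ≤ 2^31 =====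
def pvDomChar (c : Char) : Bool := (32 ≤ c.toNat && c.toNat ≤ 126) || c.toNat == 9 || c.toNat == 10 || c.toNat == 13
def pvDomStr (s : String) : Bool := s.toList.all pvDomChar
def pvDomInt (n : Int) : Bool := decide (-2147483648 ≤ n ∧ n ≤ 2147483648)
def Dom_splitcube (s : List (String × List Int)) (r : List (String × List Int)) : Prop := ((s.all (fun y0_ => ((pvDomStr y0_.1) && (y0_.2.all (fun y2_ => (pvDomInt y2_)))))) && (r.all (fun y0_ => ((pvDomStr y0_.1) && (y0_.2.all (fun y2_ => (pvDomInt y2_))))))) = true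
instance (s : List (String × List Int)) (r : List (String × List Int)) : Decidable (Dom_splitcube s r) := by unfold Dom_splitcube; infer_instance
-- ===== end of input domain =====

-- B replaces A's coordinate-by-coordinate re-splitting of a growing piece list by a
-- per-axis interval partition combined with a cartesian product (alternative decomposition);
-- equivalence is about the returned VALUES (A returns the input object itself when nothing
-- splits, B always returns copies — indistinguishable by value).


-- ===== PORT A =====
-- shared dict-as-assoc-list primitives (Python dicts have unique keys; lookup = first match)
-- d[k]  (KeyError totalized to []; exact under Pre_, which guarantees the key is present)
def pvGet (d : List (String × List Int)) (k : String) : List Int :=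
  (d.lookup k).getD []
-- d[k] = f(d[k]) applied to the first entry with key k (models in-place mutation of d[k])
def pvMod (d : List (String × List Int)) (k : String) (f : List Int → List Int) :
    List (String × List Int) :=
  match d with
  | [] => []
  | (k', v) :: t => if k' = k then (k', f v) :: t else (k', v) :: pvMod t k f
-- d[k][c] = v  (IndexError totalized by pySetD; exact under Pre_)
def pvSet (d : List (String × List Int)) (k : String) (c : Int) (v : Int) :
    List (String × List Int) :=
  pvMod d k (fun l => PySem.List.pySetD l c v)

-- literal transliteration of A: for coord in (0,1,2), re-split every piece (deepcopy = identity)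
def splitcube (s : List (String × List Int)) (r : List (String × List Int)) :
    List (List (String × List Int)) :=
  [(0 : Int), 1, 2].foldl (fun splits coord =>
    splits.foldl (fun newsplits s =>
      let smin := PySem.List.pyGetD (pvGet s "min") coord 0
      let smax := PySem.List.pyGetD (pvGet s "max") coord 0
      let rmin := PySem.List.pyGetD (pvGet r "min") coord 0
      let rmax := PySem.List.pyGetD (pvGet r "max") coord 0
      if smin < rmin then
        if smax ≤ rmax then
          newsplits ++ [pvSet s "max" coord (rmin - 1), pvSet s "min" coord rmin]
        else
          newsplits ++ [pvSet s "max" coord (rmin - 1),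
                        pvSet (pvSet s "min" coord rmin) "max" coord rmax,
                        pvSet s "min" coord (rmax + 1)]
      else
        if smax ≤ rmax then
          newsplits ++ [s]
        else
          newsplits ++ [pvSet s "max" coord rmax, pvSet s "min" coord (rmax + 1)]) []) [s]

-- ===== PORT B =====
-- the four-case per-axis partition of [lo,hi] against [rlo,rhi]
def pvParts (lo hi rlo rhi : Int) : List (Int × Int) :=
  if lo < rlo then
    if hi ≤ rhi then [(lo, rlo - 1), (rlo, hi)]
    else [(lo, rlo - 1), (rlo, rhi), (rhi + 1, hi)]
  else
    if hi ≤ rhi then [(lo, hi)]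
    else [(lo, rhi), (rhi + 1, hi)]

-- c['min'][coord] = lo; c['max'][coord] = hi
def pvApply (d : List (String × List Int)) (c : Int) (p : Int × Int) :
    List (String × List Int) :=
  pvSet (pvSet d "min" c p.1) "max" c p.2

-- literal transliteration of B: three axis partitions, then their cartesian product
def splitcube_alt (s : List (String × List Int)) (r : List (String × List Int)) :
    List (List (String × List Int)) :=
  let ax := fun (c : Int) =>
    pvParts (PySem.List.pyGetD (pvGet s "min") c 0) (PySem.List.pyGetD (pvGet s "max") c 0)
            (PySem.List.pyGetD (pvGet r "min") c 0) (PySem.List.pyGetD (pvGet r "max") c 0)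
  (ax 0).flatMap fun p0 => (ax 1).flatMap fun p1 => (ax 2).map fun p2 =>
    pvApply (pvApply (pvApply s 0 p0) 1 p1) 2 p2

-- ===== PRECONDITION & SPEC =====
-- Python A raises KeyError/IndexError unless both dicts carry 'min' and 'max' lists of
-- length ≥ 3 (an absent key gives the default [] here, whose length is < 3).
def Pre_splitcube (s : List (String × List Int)) (r : List (String × List Int)) : Prop :=
  3 ≤ ((s.lookup "min").getD []).length ∧ 3 ≤ ((s.lookup "max").getD []).length ∧
  3 ≤ ((r.lookup "min").getD []).length ∧ 3 ≤ ((r.lookup "max").getD []).length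
instance (s : List (String × List Int)) (r : List (String × List Int)) : Decidable (Pre_splitcube s r) := by unfold Pre_splitcube; infer_instance

def pvWitness_splitcube : (List (String × List Int)) × (List (String × List Int)) :=
  ([("min", [0, 0, 0]), ("max", [5, 5, 5])], [("min", [1, 1, 1]), ("max", [3, 3, 3])])

def Spec_splitcube (s : List (String × List Int)) (r : List (String × List Int)) (out : List (List (String × List Int))) : Prop := out = splitcube_alt s r
instance (s : List (String × List Int)) (r : List (String × List Int)) (out : List (List (String × List Int))) : Decidable (Spec_splitcube s r out) := by unfold Spec_splitcube; infer_instance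

-- ===== CLAIM (what is proved, stated in full; the proofs are below) =====
def Claim_equal_splitcube : Prop := ∀ (s : List (String × List Int)) (r : List (String × List Int)), Dom_splitcube s r → Pre_splitcube s r → Spec_splitcube s r (splitcube s r)

-- ===== LEMMAS AND PROOFS =====

-- A's per-coordinate splitting of one piece, as a function (the port inlines it)
def pvStepA (r : List (String × List Int)) (c : Int) (d : List (String × List Int)) :
    List (List (String × List Int)) :=
  if PySem.List.pyGetD (pvGet d "min") c 0 < PySem.List.pyGetD (pvGet r "min") c 0 then
    if PySem.List.pyGetD (pvGet d "max") c 0 ≤ PySem.List.pyGetD (pvGet r "max") c 0 then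
      [pvSet d "max" c (PySem.List.pyGetD (pvGet r "min") c 0 - 1),
       pvSet d "min" c (PySem.List.pyGetD (pvGet r "min") c 0)]
    else
      [pvSet d "max" c (PySem.List.pyGetD (pvGet r "min") c 0 - 1),
       pvSet (pvSet d "min" c (PySem.List.pyGetD (pvGet r "min") c 0)) "max" c
         (PySem.List.pyGetD (pvGet r "max") c 0),
       pvSet d "min" c (PySem.List.pyGetD (pvGet r "max") c 0 + 1)]
  else
    if PySem.List.pyGetD (pvGet d "max") c 0 ≤ PySem.List.pyGetD (pvGet r "max") c 0 then
      [d]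
    else
      [pvSet d "max" c (PySem.List.pyGetD (pvGet r "max") c 0),
       pvSet d "min" c (PySem.List.pyGetD (pvGet r "max") c 0 + 1)]

theorem splitcube_eq_flatMap (s r : List (String × List Int)) :
    splitcube s r =
      (([s].flatMap (pvStepA r 0)).flatMap (pvStepA r 1)).flatMap (pvStepA r 2) := by
  have h : ∀ (c : Int) (L : List (List (String × List Int))),
      L.foldl (fun newsplits s =>
        let smin := PySem.List.pyGetD (pvGet s "min") c 0
        let smax := PySem.List.pyGetD (pvGet s "max") c 0
        let rmin := PySem.List.pyGetD (pvGet r "min") c 0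
        let rmax := PySem.List.pyGetD (pvGet r "max") c 0
        if smin < rmin then
          if smax ≤ rmax then
            newsplits ++ [pvSet s "max" c (rmin - 1), pvSet s "min" c rmin]
          else
            newsplits ++ [pvSet s "max" c (rmin - 1),
                          pvSet (pvSet s "min" c rmin) "max" c rmax,
                          pvSet s "min" c (rmax + 1)]
        else
          if smax ≤ rmax then
            newsplits ++ [s]
          else
            newsplits ++ [pvSet s "max" c rmax, pvSet s "min" c (rmax + 1)]) [] =
      L.flatMap (pvStepA r c) := by
    intro c L
    have hb : (fun (newsplits : List (List (String × List Int))) s =>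
        let smin := PySem.List.pyGetD (pvGet s "min") c 0
        let smax := PySem.List.pyGetD (pvGet s "max") c 0
        let rmin := PySem.List.pyGetD (pvGet r "min") c 0
        let rmax := PySem.List.pyGetD (pvGet r "max") c 0
        if smin < rmin then
          if smax ≤ rmax then
            newsplits ++ [pvSet s "max" c (rmin - 1), pvSet s "min" c rmin]
          else
            newsplits ++ [pvSet s "max" c (rmin - 1),
                          pvSet (pvSet s "min" c rmin) "max" c rmax,
                          pvSet s "min" c (rmax + 1)]
        else
          if smax ≤ rmax then
            newsplits ++ [s]
          else
            newsplits ++ [pvSet s "max" c rmax, pvSet s "min" c (rmax + 1)]) =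
        (fun acc d => acc ++ pvStepA r c d) := by
      funext acc d
      dsimp only [pvStepA]
      split_ifs <;> rfl
    rw [hb, PySem.List.foldl_append_eq_flatMap, List.nil_append]
  simp only [splitcube, List.foldl_cons, List.foldl_nil, h]

-- assoc-list lookup/modify facts (Python dicts: unique keys, first match)
theorem lookup_pvMod_ne (d : List (String × List Int)) (k k' : String)
    (f : List Int → List Int) (h : k' ≠ k) : (pvMod d k f).lookup k' = d.lookup k' := by
  induction d with
  | nil => rfl
  | cons a t ih =>
    obtain ⟨ka, va⟩ := a
    by_cases hk : ka = k
    · subst hk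
      have hbe : (k' == ka) = false := by simp [h]
      simp [pvMod, List.lookup, hbe]
    · by_cases hk' : k' = ka
      · subst hk'
        simp [pvMod, hk, List.lookup]
      · have : (k' == ka) = false := by simp [hk']
        simp [pvMod, hk, List.lookup, this, ih]

theorem lookup_pvMod_self (d : List (String × List Int)) (k : String)
    (f : List Int → List Int) (v : List Int) (h : d.lookup k = some v) :
    (pvMod d k f).lookup k = some (f v) := by
  induction d with
  | nil => simp [List.lookup] at h
  | cons a t ih =>
    obtain ⟨ka, va⟩ := a
    by_cases hk : ka = k
    · subst hk
      simp [List.lookup] at h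
      simp [pvMod, h]
    · have : (k == ka) = false := by simp [Ne.symm hk]
      simp [List.lookup, this] at h
      simp [pvMod, hk, List.lookup, this, ih h]

theorem pvMod_eq_self (d : List (String × List Int)) (k : String)
    (f : List Int → List Int) (v : List Int) (h : d.lookup k = some v) (hf : f v = v) :
    pvMod d k f = d := by
  induction d with
  | nil => rfl
  | cons a t ih =>
    obtain ⟨ka, va⟩ := a
    by_cases hk : ka = k
    · subst hk
      simp [List.lookup] at h
      simp [pvMod, h, hf]
    · have : (k == ka) = false := by simp [Ne.symm hk]
      simp [List.lookup, this] at h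
      simp [pvMod, hk, ih h]

theorem lookup_of_len (d : List (String × List Int)) (k : String)
    (h : 3 ≤ ((d.lookup k).getD []).length) : d.lookup k = some ((d.lookup k).getD []) := by
  cases hk : d.lookup k with
  | none => rw [hk] at h; simp at h
  | some v => simp

-- setting a coordinate (0/1/2) back to its current value is the identity
theorem set_id (m : List Int) (c : Int) (hc : c = 0 ∨ c = 1 ∨ c = 2)
    (hm : 3 ≤ m.length) : PySem.List.pySetD m c (PySem.List.pyGetD m c 0) = m := by
  rcases m with _ | ⟨a, _ | ⟨b, _ | ⟨c2, tl⟩⟩⟩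
  · simp at hm
  · simp at hm
  · simp at hm
  · rcases hc with rfl | rfl | rfl <;> simp [pysem]

-- reading a coordinate other than the one just set is unchanged
theorem get_set_ne (m : List Int) (v : Int) (c c' : Int) (hc : c = 0 ∨ c = 1 ∨ c = 2)
    (hc' : c' = 0 ∨ c' = 1 ∨ c' = 2) (hne : c ≠ c') (hm : 3 ≤ m.length) :
    PySem.List.pyGetD (PySem.List.pySetD m c v) c' 0 = PySem.List.pyGetD m c' 0 := by
  rcases m with _ | ⟨a, _ | ⟨b, _ | ⟨c2, tl⟩⟩⟩
  · simp at hm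
  · simp at hm
  · simp at hm
  · rcases hc with rfl | rfl | rfl <;> rcases hc' with rfl | rfl | rfl <;>
      first | (exact absurd rfl hne) | simp [pysem]

theorem lookup_pvApply_min (d : List (String × List Int)) (c : Int) (p : Int × Int)
    (m : List Int) (hm : d.lookup "min" = some m) :
    (pvApply d c p).lookup "min" = some (PySem.List.pySetD m c p.1) := by
  unfold pvApply pvSet
  rw [lookup_pvMod_ne _ "max" "min" _ (by decide)]
  exact lookup_pvMod_self _ _ _ _ hm

theorem lookup_pvApply_max (d : List (String × List Int)) (c : Int) (p : Int × Int)
    (x : List Int) (hx : d.lookup "max" = some x) :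
    (pvApply d c p).lookup "max" = some (PySem.List.pySetD x c p.2) := by
  unfold pvApply pvSet
  exact lookup_pvMod_self _ _ _ _ ((lookup_pvMod_ne _ "min" "max" _ (by decide)).trans hx)

-- A's step on one well-formed piece IS the axis partition mapped through pvApply
theorem pvStepA_eq (r d : List (String × List Int)) (c : Int) (hc : c = 0 ∨ c = 1 ∨ c = 2)
    (m x : List Int) (hm : d.lookup "min" = some m) (hm3 : 3 ≤ m.length)
    (hx : d.lookup "max" = some x) (hx3 : 3 ≤ x.length) :
    pvStepA r c d =
      (pvParts (PySem.List.pyGetD (pvGet d "min") c 0) (PySem.List.pyGetD (pvGet d "max") c 0)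
        (PySem.List.pyGetD (pvGet r "min") c 0) (PySem.List.pyGetD (pvGet r "max") c 0)).map
        (pvApply d c) := by
  have hgm : pvGet d "min" = m := by simp [pvGet, hm]
  have hgx : pvGet d "max" = x := by simp [pvGet, hx]
  have hidmin : pvSet d "min" c (PySem.List.pyGetD (pvGet d "min") c 0) = d :=
    pvMod_eq_self d "min" _ m hm (by rw [hgm]; exact set_id m c hc hm3)
  have hmaxlookup : ∀ v, (pvSet d "min" c v).lookup "max" = some x :=
    fun v => (lookup_pvMod_ne _ "min" "max" _ (by decide)).trans hx
  have hidmax : ∀ d', d'.lookup "max" = some x →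
      pvSet d' "max" c (PySem.List.pyGetD (pvGet d "max") c 0) = d' :=
    fun d' h' => pvMod_eq_self d' "max" _ x h' (by rw [hgx]; exact set_id x c hc hx3)
  unfold pvStepA pvParts
  split_ifs with h1 h2 h3 <;> simp only [List.map, pvApply]
  · rw [hidmin, hidmax _ (hmaxlookup _)]
  · rw [hidmin, hidmax _ (hmaxlookup _)]
  · rw [hidmin, hidmax _ hx]
  · rw [hidmin, hidmax _ (hmaxlookup _)]

theorem spec_all (s r : List (String × List Int)) (hpre : Pre_splitcube s r) :
    splitcube s r = splitcube_alt s r := by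
  obtain ⟨hs1, hs2, hr1, hr2⟩ := hpre
  obtain ⟨m, hm, hm3⟩ : ∃ m, s.lookup "min" = some m ∧ 3 ≤ m.length :=
    ⟨_, lookup_of_len s "min" hs1, hs1⟩
  obtain ⟨x, hx, hx3⟩ : ∃ x, s.lookup "max" = some x ∧ 3 ≤ x.length :=
    ⟨_, lookup_of_len s "max" hs2, hs2⟩
  have hgm : pvGet s "min" = m := by simp [pvGet, hm]
  have hgx : pvGet s "max" = x := by simp [pvGet, hx]
  rw [splitcube_eq_flatMap, List.flatMap_singleton]
  rw [pvStepA_eq r s 0 (by left; rfl) m x hm hm3 hx hx3]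
  rw [List.flatMap_map, List.flatMap_assoc]
  dsimp only [splitcube_alt]
  refine congrArg (fun F => List.flatMap F _) (funext fun p0 => ?_)
  -- coordinate 1 on the piece obtained at coordinate 0
  have hm0 := lookup_pvApply_min s 0 p0 m hm
  have hx0 := lookup_pvApply_max s 0 p0 x hx
  have hm03 : 3 ≤ (PySem.List.pySetD m 0 p0.1).length := by
    rw [PySem.List.length_pySetD]; exact hm3
  have hx03 : 3 ≤ (PySem.List.pySetD x 0 p0.2).length := by
    rw [PySem.List.length_pySetD]; exact hx3
  rw [pvStepA_eq r _ 1 (by right; left; rfl) _ _ hm0 hm03 hx0 hx03]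
  have e1 : PySem.List.pyGetD (pvGet (pvApply s 0 p0) "min") 1 0 =
      PySem.List.pyGetD (pvGet s "min") 1 0 := by
    rw [hgm]
    simp only [pvGet, hm0, Option.getD_some]
    exact get_set_ne m p0.1 0 1 (by left; rfl) (by right; left; rfl) (by decide) hm3
  have e2 : PySem.List.pyGetD (pvGet (pvApply s 0 p0) "max") 1 0 =
      PySem.List.pyGetD (pvGet s "max") 1 0 := by
    rw [hgx]
    simp only [pvGet, hx0, Option.getD_some]
    exact get_set_ne x p0.2 0 1 (by left; rfl) (by right; left; rfl) (by decide) hx3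
  rw [e1, e2, List.flatMap_map]
  refine congrArg (fun F => List.flatMap F _) (funext fun p1 => ?_)
  -- coordinate 2 on the piece obtained at coordinates 0 and 1
  have hm1 := lookup_pvApply_min (pvApply s 0 p0) 1 p1 _ hm0
  have hx1 := lookup_pvApply_max (pvApply s 0 p0) 1 p1 _ hx0
  have hm13 : 3 ≤ (PySem.List.pySetD (PySem.List.pySetD m 0 p0.1) 1 p1.1).length := by
    rw [PySem.List.length_pySetD]; exact hm03
  have hx13 : 3 ≤ (PySem.List.pySetD (PySem.List.pySetD x 0 p0.2) 1 p1.2).length := by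
    rw [PySem.List.length_pySetD]; exact hx03
  rw [pvStepA_eq r _ 2 (by right; right; rfl) _ _ hm1 hm13 hx1 hx13]
  have e3 : PySem.List.pyGetD (pvGet (pvApply (pvApply s 0 p0) 1 p1) "min") 2 0 =
      PySem.List.pyGetD (pvGet s "min") 2 0 := by
    rw [hgm]
    simp only [pvGet, hm1, Option.getD_some]
    rw [get_set_ne _ p1.1 1 2 (by right; left; rfl) (by right; right; rfl) (by decide) hm03]
    exact get_set_ne m p0.1 0 2 (by left; rfl) (by right; right; rfl) (by decide) hm3
  have e4 : PySem.List.pyGetD (pvGet (pvApply (pvApply s 0 p0) 1 p1) "max") 2 0 =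
      PySem.List.pyGetD (pvGet s "max") 2 0 := by
    rw [hgx]
    simp only [pvGet, hx1, Option.getD_some]
    rw [get_set_ne _ p1.2 1 2 (by right; left; rfl) (by right; right; rfl) (by decide) hx03]
    exact get_set_ne x p0.2 0 2 (by left; rfl) (by right; right; rfl) (by decide) hx3
  rw [e3, e4]

-- ===== VERDICT (by name: the statement is the Claim_ definition above) =====
theorem splitcube_spec : Claim_equal_splitcube := by
  intro s r _ hpre
  unfold Spec_splitcube
  exact spec_all s r hpre
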